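-- pv_equiv track=rewrite | github.com/itsnaser/DA2005-LABO | Lab 2/polynom.py | drop_zeroes
-- ===== SOURCE A (Python) =====
-- def drop_zeroes(polynom: list) -> list:
--     result = []
--     amount_zeros = 0
--     # loop from the end of the list
--     for coeff in reversed(polynom):
--         # count how many zeros are there at the end of the list
--         # and store amount zeros in amount_zeros variable
--         if coeff == 0:
--             amount_zeros += 1
--             continue
--         # stop counting once there is some value greater or less than 0
--         else:
--             break
--     # copy the original list to the result list
--     # while ignoring the last (amount_zeros) indexes
--     # which are stored in our variable
--     # e.g. list_length = 8 (9 items) , amount_zeros = 3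
--     # 8 - 3 = 5 , this will add first 6 items in the list
--     for i in range(len(polynom)-amount_zeros):
--         result.append(polynom[i])
--     return result
-- ===== SOURCE B (Python) =====
-- def drop_zeroes(polynom: list) -> list:
--     last = 0
--     for i, coeff in enumerate(polynom):
--         if coeff != 0:
--             last = i + 1
--     return polynom[:last]
-- ===== Notes on version B (the rewrite author's own statement) =====
-- stated objective: simpler
-- what changed: Replaced A's backward count-trailing-zeros loop with break plus an index-range copy loop by a single forward enumerate pass tracking the index one past the last non-zero coefficient, followed by one slice.
import Mathlib
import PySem

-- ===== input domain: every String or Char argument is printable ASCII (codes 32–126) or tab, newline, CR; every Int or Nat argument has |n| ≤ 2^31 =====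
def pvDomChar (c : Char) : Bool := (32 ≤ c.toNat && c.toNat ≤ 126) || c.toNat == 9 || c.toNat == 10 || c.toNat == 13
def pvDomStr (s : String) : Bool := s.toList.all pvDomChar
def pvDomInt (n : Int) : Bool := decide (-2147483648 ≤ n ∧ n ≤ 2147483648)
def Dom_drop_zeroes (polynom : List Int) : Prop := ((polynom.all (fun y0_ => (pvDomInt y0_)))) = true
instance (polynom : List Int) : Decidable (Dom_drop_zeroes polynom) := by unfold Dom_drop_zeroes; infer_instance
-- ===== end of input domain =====

-- B changes the decomposition: one forward enumerate pass tracking the last significant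
-- index, then a slice — instead of A's backward count-and-break plus index copy loop.
-- ===== PORT A =====
-- the first loop: count zeros from the end of the list, stopping at the first non-zero
def pvCountA : List Int → Int
  | [] => 0
  | c :: rest => if c == 0 then pvCountA rest + 1 else 0

def drop_zeroes (polynom : List Int) : List Int :=
  let amount_zeros := pvCountA polynom.reverse
  -- for i in range(len(polynom)-amount_zeros): result.append(polynom[i])
  -- (polynom[i] never raises here: 0 ≤ i < len - amount_zeros ≤ len, so pyGetD is exact)
  (PySem.List.pyRange 0 ((polynom.length : Int) - amount_zeros) 1).foldl
    (fun result i => result ++ [PySem.List.pyGetD polynom i 0]) []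

-- ===== PORT B =====
def drop_zeroes_alt (polynom : List Int) : List Int :=
  let last := (PySem.List.enumerate polynom 0).foldl
    (fun last ic => if ic.2 ≠ 0 then ic.1 + 1 else last) 0
  PySem.List.slice polynom none (some last)

-- ===== PRECONDITION & SPEC =====
def Spec_drop_zeroes (polynom : List Int) (out : List Int) : Prop := out = drop_zeroes_alt polynom
instance (polynom : List Int) (out : List Int) : Decidable (Spec_drop_zeroes polynom out) := by unfold Spec_drop_zeroes; infer_instance

-- ===== CLAIM (what is proved, stated in full; the proofs are below) =====
def Claim_equal_drop_zeroes : Prop := ∀ (polynom : List Int), Dom_drop_zeroes polynom → Spec_drop_zeroes polynom (drop_zeroes polynom)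

-- ===== LEMMAS AND PROOFS =====

lemma pvCountA_nonneg (l : List Int) : 0 ≤ pvCountA l := by
  induction l with
  | nil => simp [pvCountA]
  | cons c r ih => simp only [pvCountA]; split <;> omega

lemma pvCountA_le_length (l : List Int) : pvCountA l ≤ l.length := by
  induction l with
  | nil => simp [pvCountA]
  | cons c r ih => simp only [pvCountA, List.length_cons]; split <;> [omega; positivity]

-- map of getD over an initial range is take
lemma map_getD_range (p : List Int) (m : Nat) (hm : m ≤ p.length) :
    (List.range m).map (fun k => p.getD k 0) = p.take m := by
  induction m with
  | zero => simp
  | succ n ih =>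
    rw [List.range_succ, List.map_append, ih (by omega), List.take_add_one]
    simp [List.getD, List.getElem?_eq_getElem (by omega : n < p.length)]

-- A's result is a take
lemma dropA_eq_take (p : List Int) :
    drop_zeroes p = p.take ((p.length : Int) - pvCountA p.reverse).toNat := by
  have h1 := pvCountA_nonneg p.reverse
  have h2 := pvCountA_le_length p.reverse
  rw [List.length_reverse] at h2
  show (PySem.List.pyRange 0 ((p.length : Int) - pvCountA p.reverse) 1).foldl
    (fun result i => result ++ [PySem.List.pyGetD p i 0]) [] = _
  rw [PySem.List.foldl_append_singleton_eq_map, List.nil_append, PySem.List.pyRange_one,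
    List.map_map]
  simp only [Function.comp_def, zero_add]
  have : ∀ k ∈ List.range ((p.length : Int) - pvCountA p.reverse - 0).toNat,
      PySem.List.pyGetD p (k : Int) 0 = p.getD k 0 := by
    intro k _; exact PySem.List.pyGetD_natCast p k 0
  rw [List.map_congr_left this, map_getD_range p _ (by omega)]
  congr 1; omega

-- snoc characterization of A's trailing-zero count
lemma pvCountA_snoc (ys : List Int) (x : Int) :
    pvCountA (ys ++ [x]).reverse = if x = 0 then pvCountA ys.reverse + 1 else 0 := by
  simp only [List.reverse_append, List.reverse_singleton, List.singleton_append, pvCountA]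
  split <;> split <;> simp_all

-- enumerate over an append
lemma enumerate_append (ys zs : List Int) (s : Int) :
    PySem.List.enumerate (ys ++ zs) s
      = PySem.List.enumerate ys s ++ PySem.List.enumerate zs (s + ys.length) := by
  induction ys generalizing s with
  | nil => simp [PySem.List.enumerate_nil]
  | cons c r ih =>
    simp only [List.cons_append, PySem.List.enumerate_cons, ih, List.length_cons]
    congr 3; push_cast; ring

-- B's fold: abbreviation used only in proofs
def pvLast (p : List Int) (s acc : Int) : Int :=
  (PySem.List.enumerate p s).foldl (fun last ic => if ic.2 ≠ 0 then ic.1 + 1 else last) acc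

lemma pvLast_snoc (ys : List Int) (x : Int) (s acc : Int) :
    pvLast (ys ++ [x]) s acc
      = if x ≠ 0 then s + ys.length + 1 else pvLast ys s acc := by
  unfold pvLast
  rw [enumerate_append, List.foldl_append]
  simp [PySem.List.enumerate_cons, PySem.List.enumerate_nil]

lemma pvLast_bounds (p : List Int) (s acc : Int) (h0 : 0 ≤ acc) (hs : acc ≤ s) :
    0 ≤ pvLast p s acc ∧ pvLast p s acc ≤ s + p.length := by
  induction p generalizing s acc with
  | nil => simp [pvLast, PySem.List.enumerate_nil]; omega
  | cons c r ih =>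
    have step : pvLast (c :: r) s acc = pvLast r (s + 1) (if c ≠ 0 then s + 1 else acc) := by
      simp [pvLast, PySem.List.enumerate_cons]
    rw [step]
    have := ih (s + 1) (if c ≠ 0 then s + 1 else acc) (by split <;> omega) (by split <;> omega)
    simp only [List.length_cons]
    push_cast
    push_cast at this
    omega

-- B's result is a take
lemma dropB_eq_take (p : List Int) :
    drop_zeroes_alt p = p.take (pvLast p 0 0).toNat := by
  have h := pvLast_bounds p 0 0 le_rfl le_rfl
  unfold drop_zeroes_alt
  exact PySem.List.slice_to p h.1

lemma take_eq (p : List Int) :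
    p.take ((p.length : Int) - pvCountA p.reverse).toNat = p.take (pvLast p 0 0).toNat := by
  induction p using List.reverseRecOn with
  | nil => simp [pvCountA, pvLast, PySem.List.enumerate_nil]
  | append_singleton ys x ih =>
    rw [pvCountA_snoc, pvLast_snoc]
    by_cases hx : x = 0
    · simp only [hx, if_true, ne_eq, not_true_eq_false, if_false]
      have hA1 := pvCountA_nonneg ys.reverse
      have hA2 := pvCountA_le_length ys.reverse
      rw [List.length_reverse] at hA2
      have hB := pvLast_bounds ys 0 0 le_rfl le_rfl
      rw [List.length_append, List.length_singleton]
      push_cast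
      rw [List.take_append_of_le_length
            (by omega : ((ys.length : Int) + 1 - (pvCountA ys.reverse + 1)).toNat ≤ ys.length),
          List.take_append_of_le_length (by omega : (pvLast ys 0 0).toNat ≤ ys.length)]
      convert ih using 2
      omega
    · simp only [hx, if_false, ne_eq, not_false_eq_true, if_true]
      rw [List.length_append, List.length_singleton]
      push_cast
      rw [show ((ys.length : Int) + 1 - 0).toNat = ys.length + 1 by omega,
          show ((0 : Int) + ys.length + 1).toNat = ys.length + 1 by omega]

-- ===== VERDICT (by name: the statement is the Claim_ definition above) =====
theorem drop_zeroes_spec : Claim_equal_drop_zeroes := by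
  intro p _
  unfold Spec_drop_zeroes
  rw [dropA_eq_take, dropB_eq_take, take_eq]
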